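-- pv_equiv track=rewrite | github.com/GLOW-Delta-2025/serial-router | states_diagram/diagram_generator.py | build_color_palette
-- ===== SOURCE A (Python) =====
-- from typing import Dict, Iterable, List, Optional, Tuple
--
-- def build_color_palette(entities: List[Dict[str, str]]) -> Dict[str, str]:
-- 	palette = ["#5D8AA8", "#F28C28", "#4682B4", "#8F9779", "#B565A7", "#CD5C5C", "#729FCF"]
-- 	assignment: Dict[str, str] = {}
-- 	palette_idx = 0
-- 	for entity in entities:
-- 		eid = entity["Id"]
-- 		if eid not in assignment:
-- 			assignment[eid] = palette[palette_idx % len(palette)]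
-- 			palette_idx += 1
-- 	assignment.setdefault("ARM", "#F4C95D")
-- 	return assignment
-- ===== SOURCE B (Python) =====
-- def build_color_palette(entities):
-- 	palette = ["#5D8AA8", "#F28C28", "#4682B4", "#8F9779", "#B565A7", "#CD5C5C", "#729FCF"]
-- 	ids = [e["Id"] for e in entities]
-- 	firsts = [x for i, x in enumerate(ids) if x not in ids[:i]]
-- 	colors = palette * (len(firsts) // len(palette) + 1)
-- 	assignment = dict(zip(firsts, colors))
-- 	assignment.setdefault("ARM", "#F4C95D")
-- 	return assignment
-- ===== Notes on version B (the rewrite author's own statement) =====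
-- stated objective: alternative
-- what changed: Replaces A's single pass that interleaves dict-membership with a running palette counter by staged passes with different mechanisms: first-occurrence detection by scanning the prefix ids[:i] of a plain id list (no dict, no counter), color supply by list repetition palette*(n//7+1) instead of modulo indexing, and a single dict(zip(...)) construction.
import Mathlib
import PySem

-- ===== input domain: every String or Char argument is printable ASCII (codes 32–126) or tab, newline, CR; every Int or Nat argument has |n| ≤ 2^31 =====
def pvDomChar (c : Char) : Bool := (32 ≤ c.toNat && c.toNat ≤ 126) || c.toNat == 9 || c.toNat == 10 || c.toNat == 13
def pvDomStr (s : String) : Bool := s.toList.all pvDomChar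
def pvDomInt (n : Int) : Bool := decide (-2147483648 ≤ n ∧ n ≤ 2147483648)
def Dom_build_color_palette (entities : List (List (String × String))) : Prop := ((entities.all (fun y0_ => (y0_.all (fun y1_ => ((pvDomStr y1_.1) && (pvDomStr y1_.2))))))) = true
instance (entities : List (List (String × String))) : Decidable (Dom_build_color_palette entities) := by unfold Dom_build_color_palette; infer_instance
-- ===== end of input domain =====

-- B replaces A's single pass (dict membership + running palette counter + modulo indexing) by
-- staged passes: prefix-scan first-occurrence filtering, a repeated-palette list, and one dict(zip).
-- Objective: alternative (same result by a different mechanism; B is quadratic in the id count).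

-- ===== PORT A =====
def pvPaletteA : List String := ["#5D8AA8", "#F28C28", "#4682B4", "#8F9779", "#B565A7", "#CD5C5C", "#729FCF"]

-- palette[palette_idx % len(palette)]
def pvColorA (idx : Int) : String :=
  PySem.List.pyGetD pvPaletteA (PySem.Int.mod idx (pvPaletteA.length : Int)) ""

-- the body of A's for-loop; state = (assignment, palette_idx)
def pvStepA (st : PySem.Dict String String × Int) (entity : List (String × String)) :
    PySem.Dict String String × Int :=
  match (List.find? (fun p => p.1 == "Id") entity).map (·.2) with
  | none => st  -- entity["Id"] raises KeyError here in Python; excluded by Pre_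
  | some eid =>
    if st.1.contains eid then st
    else (st.1.insert eid (pvColorA st.2), st.2 + 1)

def build_color_palette (entities : List (List (String × String))) : List (String × String) :=
  let r := entities.foldl pvStepA (PySem.Dict.empty, 0)
  ((r.1).setdefault "ARM" "#F4C95D").items

-- ===== PORT B =====
def pvPaletteB : List String := ["#5D8AA8", "#F28C28", "#4682B4", "#8F9779", "#B565A7", "#CD5C5C", "#729FCF"]

def build_color_palette_alt (entities : List (List (String × String))) : List (String × String) :=
  -- ids = [e["Id"] for e in entities]; e["Id"] raises KeyError on a missing key (excluded by
  -- Pre_), so filterMap is exact on Pre_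
  let ids := entities.filterMap (fun e => (List.find? (fun p => p.1 == "Id") e).map (·.2))
  -- firsts = [x for i, x in enumerate(ids) if x not in ids[:i]]
  let firsts := ((PySem.List.enumerate ids).filter
      (fun p => !(PySem.List.slice ids none (some p.1)).contains p.2)).map (·.2)
  -- colors = palette * (len(firsts) // len(palette) + 1); lengths are nonnegative, so Nat '/' is
  -- exactly Python's '//' here
  let colors := (List.replicate (firsts.length / pvPaletteB.length + 1) pvPaletteB).flatten
  -- assignment = dict(zip(firsts, colors)); zip truncates to the shorter list, as List.zip does
  let assignment := PySem.Dict.ofList (firsts.zip colors)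
  (assignment.setdefault "ARM" "#F4C95D").items

-- ===== PRECONDITION & SPEC =====
-- Pre_ excludes exactly the inputs where some entity has no "Id" key: there Python A raises
-- KeyError (and Python B raises KeyError too).
def Pre_build_color_palette (entities : List (List (String × String))) : Prop :=
  (entities.all (fun e => e.any (fun p => p.1 == "Id"))) = true
instance (entities : List (List (String × String))) : Decidable (Pre_build_color_palette entities) := by
  unfold Pre_build_color_palette; infer_instance

def pvWitness_build_color_palette : (List (List (String × String))) :=
  [[("Id", "x")], [("Id", "y"), ("Name", "n")], [("Id", "x")]]

def Spec_build_color_palette (entities : List (List (String × String))) (out : List (String × String)) : Prop := out = build_color_palette_alt entities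
instance (entities : List (List (String × String))) (out : List (String × String)) : Decidable (Spec_build_color_palette entities out) := by unfold Spec_build_color_palette; infer_instance

-- ===== CLAIM (what is proved, stated in full; the proofs are below) =====
def Claim_equal_build_color_palette : Prop := ∀ (entities : List (List (String × String))), Dom_build_color_palette entities → Pre_build_color_palette entities → Spec_build_color_palette entities (build_color_palette entities)

-- ===== LEMMAS AND PROOFS =====

-- the loop body of A on an id that is present (proofs only)
def pvStep' (st : PySem.Dict String String × Int) (eid : String) :
    PySem.Dict String String × Int :=
  if st.1.contains eid then st
  else (st.1.insert eid (pvColorA st.2), st.2 + 1)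

-- the dict A's loop builds, over a list of ids (proofs only)
def pvAbs (ids : List String) : PySem.Dict String String :=
  PySem.Dict.ofList ((PySem.List.enumerate (PySem.Set.ofList ids)).map (fun p => (p.2, pvColorA p.1)))

-- B's first-occurrence filter (proofs only; definitionally the 'firsts' of the port)
def pvFirsts (ids : List String) : List String :=
  ((PySem.List.enumerate ids).filter
      (fun p => !(PySem.List.slice ids none (some p.1)).contains p.2)).map (·.2)

lemma pvFirsts_eq_ofList (ids : List String) : pvFirsts ids = PySem.Set.ofList ids := by
  induction ids using List.reverseRecOn with
  | nil => rfl
  | append_singleton ids x ih =>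
    unfold pvFirsts
    unfold pvFirsts at ih
    rw [PySem.List.enumerate_append, PySem.List.enumerate_cons, PySem.List.enumerate_nil,
        List.filter_append, List.map_append]
    have hpre : (PySem.List.enumerate ids).filter
        (fun p => !(PySem.List.slice (ids ++ [x]) none (some p.1)).contains p.2)
        = (PySem.List.enumerate ids).filter
        (fun p => !(PySem.List.slice ids none (some p.1)).contains p.2) := by
      apply List.filter_congr
      intro p hp
      rcases (PySem.List.mem_enumerate_iff _ _ _).mp hp with ⟨k, hk, rfl⟩
      have h0 : ((0:Int) + (k:Nat)) = ((k:Nat):Int) := by omega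
      simp only [h0, PySem.List.slice_to_natCast]
      rw [List.take_append_of_le_length (by omega)]
    rw [hpre]
    have h0 : ((0:Int) + (ids.length:Nat)) = ((ids.length:Nat):Int) := by omega
    rw [PySem.Set.ofList_append_singleton]
    by_cases hx : x ∈ ids
    · have : (PySem.List.slice (ids ++ [x]) none (some ((0:Int) + (ids.length:Nat)))).contains x = true := by
        rw [h0, PySem.List.slice_to_natCast, List.take_append_of_le_length (by omega), List.take_length]
        simpa using hx
      simp only [List.filter_cons, List.filter_nil, this]
      rw [PySem.Set.add_of_mem (by simpa [PySem.Set.mem_ofList] using hx)]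
      simpa using ih
    · have : (PySem.List.slice (ids ++ [x]) none (some ((0:Int) + (ids.length:Nat)))).contains x = false := by
        rw [h0, PySem.List.slice_to_natCast, List.take_append_of_le_length (by omega), List.take_length]
        simpa using hx
      simp only [List.filter_cons, List.filter_nil, this]
      rw [PySem.Set.add_of_not_mem (by simpa [PySem.Set.mem_ofList] using hx)]
      simp only [Bool.not_false, if_pos, List.map_cons, List.map_nil]
      rw [← ih]

lemma pvCyc (r k : Nat) (hk : k < r * pvPaletteB.length) :
    ((List.replicate r pvPaletteB).flatten)[k]? = pvPaletteB[k % pvPaletteB.length]? := by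
  induction r generalizing k with
  | zero => omega
  | succ r ih =>
    rw [List.replicate_succ, List.flatten_cons]
    by_cases h : k < pvPaletteB.length
    · rw [List.getElem?_append_left h, Nat.mod_eq_of_lt h]
    · rw [List.getElem?_append_right (by omega)]
      have h2 : k - pvPaletteB.length < r * pvPaletteB.length := by
        simp [pvPaletteB] at *; omega
      rw [ih _ h2]
      congr 1
      simp only [show pvPaletteB.length = 7 from rfl] at h ⊢
      omega

lemma pvZipColors (u : List String) :
    u.zip ((List.replicate (u.length / pvPaletteB.length + 1) pvPaletteB).flatten)
      = (PySem.List.enumerate u).map (fun p => (p.2, pvColorA p.1)) := by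
  have hlen : ((List.replicate (u.length / pvPaletteB.length + 1) pvPaletteB).flatten).length
      = (u.length / pvPaletteB.length + 1) * pvPaletteB.length := by
    simp [List.length_flatten, List.sum_replicate]
  have hge : u.length ≤ ((List.replicate (u.length / pvPaletteB.length + 1) pvPaletteB).flatten).length := by
    rw [hlen]; simp only [show pvPaletteB.length = 7 from rfl]; omega
  apply List.ext_getElem
  · simp [PySem.List.length_enumerate]; omega
  · intro k h1 h2
    have hk : k < u.length := by simpa using h2
    have hkf : k < ((List.replicate (u.length / pvPaletteB.length + 1) pvPaletteB).flatten).length := by omega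
    rw [List.getElem_zip, List.getElem_map, PySem.List.getElem_enumerate]
    have hflat : ((List.replicate (u.length / pvPaletteB.length + 1) pvPaletteB).flatten)[k]
        = pvPaletteB[k % pvPaletteB.length]'(by simp only [show pvPaletteB.length = 7 from rfl]; omega) := by
      have := pvCyc (u.length / pvPaletteB.length + 1) k (by rw [← hlen]; exact hkf)
      rw [List.getElem?_eq_getElem hkf, List.getElem?_eq_getElem (by simp only [show pvPaletteB.length = 7 from rfl]; omega)] at this
      exact Option.some_injective _ this
    rw [hflat]
    have hcol : pvColorA ((0 : Int) + (k : Nat)) = pvPaletteB[k % pvPaletteB.length]'(by simp only [show pvPaletteB.length = 7 from rfl]; omega) := by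
      rw [pvColorA]
      rw [show ((0:Int) + (k:Nat)) = ((k:Nat):Int) from by omega, PySem.Int.mod_natCast,
        PySem.List.pyGetD_natCast]
      rw [List.getD_eq_getElem?_getD, List.getElem?_eq_getElem
        (by simp only [show pvPaletteA.length = 7 from rfl]; omega)]
      rfl
    rw [hcol]

lemma pvAbs_items (ids : List String) :
    (pvAbs ids).items
      = (PySem.List.enumerate (PySem.Set.ofList ids)).map (fun p => (p.2, pvColorA p.1)) := by
  have h := PySem.Dict.items_foldl_insert_fresh
      ((PySem.List.enumerate (PySem.Set.ofList ids)).map (fun p => (p.2, pvColorA p.1)))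
      (fun a => a.1) (fun a => a.2) PySem.Dict.empty
      (by intro a _; simp)
      (by simp [List.map_map, Function.comp_def, PySem.List.map_snd_enumerate, PySem.Set.nodup_ofList])
  simp only [PySem.Dict.empty, List.nil_append] at h
  simp only [pvAbs, PySem.Dict.ofList, PySem.Dict.update]
  simpa using h

lemma pvAbs_keys (ids : List String) :
    (pvAbs ids).keys = PySem.Set.ofList ids := by
  simp [PySem.Dict.keys, pvAbs_items, List.map_map, Function.comp_def, PySem.List.map_snd_enumerate]

lemma pvAbs_append_of_not_mem (ids : List String) (x : String) (hx : x ∉ PySem.Set.ofList ids) :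
    pvAbs (ids ++ [x]) = (pvAbs ids).insert x (pvColorA ((PySem.Set.ofList ids).length : Int)) := by
  have hc : (pvAbs ids).contains x = false := by
    rw [← Bool.not_eq_true, PySem.Dict.contains_iff_mem_keys, pvAbs_keys]; exact hx
  apply PySem.Dict.ext
  rw [pvAbs_items, PySem.Dict.items_insert_of_not_contains _ _ hc, pvAbs_items,
      PySem.Set.ofList_append_singleton, PySem.Set.add_of_not_mem hx,
      PySem.List.enumerate_append]
  simp [PySem.List.enumerate_cons]

lemma pvMain (ids : List String) :
    ids.foldl pvStep' (PySem.Dict.empty, 0)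
      = (pvAbs ids, ((PySem.Set.ofList ids).length : Int)) := by
  induction ids using List.reverseRecOn with
  | nil => rfl
  | append_singleton ids x ih =>
    rw [List.foldl_append, ih]
    simp only [List.foldl_cons, List.foldl_nil]
    by_cases hx : x ∈ PySem.Set.ofList ids
    · have hc : (pvAbs ids).contains x = true := by
        rw [PySem.Dict.contains_iff_mem_keys, pvAbs_keys]; exact hx
      have habs : pvAbs (ids ++ [x]) = pvAbs ids := by
        simp [pvAbs, PySem.Set.ofList_append_singleton, PySem.Set.add_of_mem hx]
      rw [PySem.Set.ofList_append_singleton, PySem.Set.add_of_mem hx, habs]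
      simp [pvStep', hc]
    · have hc : (pvAbs ids).contains x = false := by
        rw [← Bool.not_eq_true, PySem.Dict.contains_iff_mem_keys, pvAbs_keys]; exact hx
      rw [pvAbs_append_of_not_mem ids x hx, PySem.Set.ofList_append_singleton,
          PySem.Set.add_of_not_mem hx]
      simp [pvStep', hc]

lemma pvFoldA (entities : List (List (String × String))) :
    entities.foldl pvStepA (PySem.Dict.empty, 0)
      = (entities.filterMap (fun e => (List.find? (fun p => p.1 == "Id") e).map (·.2))).foldl
          pvStep' (PySem.Dict.empty, 0) := by
  rw [List.foldl_filterMap]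
  apply List.foldl_ext
  intro st e _
  cases h : (List.find? (fun p => p.1 == "Id") e).map (·.2) <;> simp [pvStepA, pvStep', h]

-- ===== VERDICT (by name: the statement is the Claim_ definition above) =====
theorem build_color_palette_spec : Claim_equal_build_color_palette := by
  intro entities _ _
  unfold Spec_build_color_palette build_color_palette build_color_palette_alt
  rw [pvFoldA, pvMain]
  show _ = ((PySem.Dict.ofList ((pvFirsts (entities.filterMap (fun e => (List.find? (fun p => p.1 == "Id") e).map (·.2)))).zip
      ((List.replicate ((pvFirsts (entities.filterMap (fun e => (List.find? (fun p => p.1 == "Id") e).map (·.2)))).length / pvPaletteB.length + 1) pvPaletteB).flatten))).setdefault "ARM" "#F4C95D").items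
  rw [pvFirsts_eq_ofList, pvZipColors]
  rfl
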